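-- pv_equiv track=rewrite | github.com/thelab33/futurefunded | app/routes/__init__.py | _sanitize_prefix
-- ===== SOURCE A (Python) =====
-- from typing import Iterable, Optional
--
-- def _sanitize_prefix(prefix: Optional[str]) -> Optional[str]:
--     if prefix is None:
--         return None
--     p = str(prefix).strip()
--     if not p or p == "/":
--         return None
--     if not p.startswith("/"):
--         p = "/" + p
--     while "//" in p:
--         p = p.replace("//", "/")
--     p = p.rstrip("/")
--     return p or None
-- ===== SOURCE B (Python) =====
-- from typing import Optional
--
-- def _sanitize_prefix(prefix: Optional[str]) -> Optional[str]:
--     if prefix is None: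
--         return None
--     segs = [s for s in str(prefix).strip().split("/") if s]
--     return "/" + "/".join(segs) if segs else None
-- ===== Notes on version B (the rewrite author's own statement) =====
-- stated objective: idiomatic
-- what changed: Replaces A's prepend-slash guard, repeated fixpoint loop collapsing doubled separators, and trailing-separator strip with a single split-on-separator, filter-empty, rejoin pass.
import Mathlib
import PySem

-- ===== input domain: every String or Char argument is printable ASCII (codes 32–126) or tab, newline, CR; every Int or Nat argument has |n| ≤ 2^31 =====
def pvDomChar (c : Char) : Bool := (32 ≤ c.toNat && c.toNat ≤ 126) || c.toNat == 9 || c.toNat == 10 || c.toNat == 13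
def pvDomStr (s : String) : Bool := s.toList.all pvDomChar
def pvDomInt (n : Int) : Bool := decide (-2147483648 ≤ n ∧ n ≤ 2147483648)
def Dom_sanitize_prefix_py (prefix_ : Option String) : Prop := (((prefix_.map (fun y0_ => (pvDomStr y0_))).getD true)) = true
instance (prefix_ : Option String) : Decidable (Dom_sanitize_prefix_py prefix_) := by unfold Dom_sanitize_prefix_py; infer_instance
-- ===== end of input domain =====

-- B replaces A's prepend-slash guard + repeated double-separator collapse loop + trailing-separator strip by one split/filter/join pass (idiomatic; same results).

-- ===== PORT A =====
-- the 'while "//" in p: p = p.replace("//", "/")' loop; each iteration strictly shortens p,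
-- so fuel p.length + 1 never runs out (totality guard only)
def collapseLoop : Nat → List Char → List Char
  | 0, p => p
  | n + 1, p =>
    if PySem.Chars.isIn ['/', '/'] p then collapseLoop n (PySem.Chars.replace p ['/', '/'] ['/'])
    else p

def sanitize_prefix_py (prefix_ : Option String) : Option String :=
  match prefix_ with
  | none => none
  | some s =>
    let p := PySem.Chars.strip s.toList
    if p = [] ∨ p = ['/'] then none
    else
      let p1 := if PySem.Chars.startswith p ['/'] then p else '/' :: p
      let p2 := collapseLoop (p1.length + 1) p1
      -- exact hand port of p.rstrip("/"): drop trailing '/' characters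
      let p3 := (p2.reverse.dropWhile (· == '/')).reverse
      if p3 = [] then none else some (String.ofList p3)

-- ===== PORT B =====
def sanitize_prefix_py_alt (prefix_ : Option String) : Option String :=
  match prefix_ with
  | none => none
  | some s =>
    let p := PySem.Chars.strip s.toList
    let segs := (PySem.Chars.splitOn p ['/']).filter (fun c => !c.isEmpty)
    if segs.isEmpty then none
    else some (String.ofList ('/' :: PySem.Chars.join ['/'] segs))

-- ===== PRECONDITION & SPEC =====
def Spec_sanitize_prefix_py (prefix_ : Option String) (out : Option String) : Prop := out = sanitize_prefix_py_alt prefix_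
instance (prefix_ : Option String) (out : Option String) : Decidable (Spec_sanitize_prefix_py prefix_ out) := by unfold Spec_sanitize_prefix_py; infer_instance

-- ===== CLAIM (what is proved, stated in full; the proofs are below) =====
def Claim_equal_sanitize_prefix_py : Prop := ∀ (prefix_ : Option String), Dom_sanitize_prefix_py prefix_ → Spec_sanitize_prefix_py prefix_ (sanitize_prefix_py prefix_)

-- ===== LEMMAS AND PROOFS =====

-- clean model of one pass of p.replace("//", "/")
def rep : List Char → List Char
  | [] => []
  | [c] => [c]
  | a :: b :: rest => if a == '/' && b == '/' then '/' :: rep rest else a :: rep (b :: rest)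

-- collapse every run of consecutive '/' to a single '/' (the loop's fixpoint)
def ds : List Char → List Char
  | [] => []
  | c :: rest =>
    if c == '/' then '/' :: ds (rest.dropWhile (· == '/')) else c :: ds rest
  termination_by l => l.length
  decreasing_by
    · have := List.length_dropWhile_le (· == '/') rest; simp; omega
    · simp

-- clean model of p.split("/")
def consHead (c : Char) : List (List Char) → List (List Char)
  | [] => [[c]]
  | h :: t => (c :: h) :: t

def sp : List Char → List (List Char)
  | [] => [[]]
  | c :: rest => if c == '/' then [] :: sp rest else consHead c (sp rest)

-- canonical result: '/' before each maximal nonempty '/'-free chunk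
mutual
def canon : List Char → List Char
  | [] => []
  | c :: t => if c == '/' then canon t else '/' :: c :: canonTail t
def canonTail : List Char → List Char
  | [] => []
  | c :: t => if c == '/' then canon t else c :: canonTail t
end

def rsl (q : List Char) : List Char := (q.reverse.dropWhile (· == '/')).reverse

def prependHead (x : List Char) : List (List Char) → List (List Char)
  | [] => [x]
  | h :: t => (x ++ h) :: t

theorem rep_cons_ne (c : Char) (rest : List Char) (h : ¬ (c == '/') = true) :
    rep (c :: rest) = c :: rep rest := by
  have h' : (c == '/') = false := by simpa using h
  cases rest with
  | nil => simp [rep]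
  | cons b r => simp [rep, h']

theorem ds_slash (r : List Char) : ds ('/' :: r) = '/' :: ds (r.dropWhile (· == '/')) := by
  rw [ds]; simp

theorem ds_cons_ne (c : Char) (rest : List Char) (h : ¬ (c == '/') = true) :
    ds (c :: rest) = c :: ds rest := by
  rw [ds]; simp [h]

theorem dw_slash_cons (r : List Char) :
    (('/' :: r).dropWhile (· == '/')) = r.dropWhile (· == '/') := by
  simp

theorem dw_cons_ne (c : Char) (r : List Char) (h : ¬ (c == '/') = true) :
    ((c :: r).dropWhile (· == '/')) = c :: r := by
  simp [List.dropWhile_cons, h]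

theorem rep_length_le (l : List Char) : (rep l).length ≤ l.length := by
  match l with
  | [] => simp [rep]
  | [c] => simp [rep]
  | a :: b :: rest =>
    by_cases h : (a == '/' && b == '/') = true
    · have := rep_length_le rest
      simp [rep, h]; omega
    · have := rep_length_le (b :: rest)
      simp [rep, h]; simp at this ⊢; omega

theorem rep_length_lt (l : List Char) (h : ['/', '/'] <:+: l) : (rep l).length < l.length := by
  match l with
  | [] => exact absurd (List.eq_nil_of_infix_nil h) (by simp)
  | [c] => have := h.length_le; simp at this
  | a :: b :: rest =>
    by_cases hab : (a == '/' && b == '/') = true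
    · have := rep_length_le rest
      simp [rep, hab]; omega
    · have hinf : ['/', '/'] <:+: b :: rest := by
        rcases List.infix_cons_iff.mp h with hp | hi
        · exfalso
          rcases hp with ⟨u, hu⟩
          simp at hu hab
          exact hab hu.1.symm hu.2.1.symm
        · exact hi
      have := rep_length_lt (b :: rest) hinf
      simp [rep, hab]; simp at this; omega

-- one replace pass commutes with dropping leading slashes
theorem dw_rep (q : List Char) :
    (rep q).dropWhile (· == '/') = rep (q.dropWhile (· == '/')) := by
  match q with
  | [] => simp [rep]
  | c :: rest =>
    by_cases hc : (c == '/') = true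
    · cases rest with
      | nil =>
        simp at hc; subst hc; simp [rep]
      | cons b r =>
        by_cases hb : (b == '/') = true
        · simp at hc hb; subst hc; subst hb
          have ih := dw_rep r
          simp only [rep, beq_self_eq_true, Bool.and_self, if_pos] at ih ⊢
          simp only [List.dropWhile_cons] at ih ⊢
          simpa using ih
        · simp at hc; subst hc
          have hb' : rep (b :: r) = b :: rep r := rep_cons_ne b r hb
          have hbf : (b == '/') = false := by simpa using hb
          simp [rep, hbf, hb', List.dropWhile_cons]
    · have hc' : rep (c :: rest) = c :: rep rest := rep_cons_ne c rest hc
      have hcf : (c == '/') = false := by simpa using hc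
      simp [hc', List.dropWhile_cons, hcf]

theorem ds_rep (p : List Char) : ds (rep p) = ds p := by
  match p with
  | [] => rfl
  | c :: rest =>
    by_cases hc : (c == '/') = true
    · cases rest with
      | nil => simp at hc; subst hc; simp [rep]
      | cons b r =>
        by_cases hb : (b == '/') = true
        · simp at hc hb; subst hc; subst hb
          have h1 : rep ('/' :: '/' :: r) = '/' :: rep r := by simp [rep]
          have ih := ds_rep (r.dropWhile (· == '/'))
          rw [h1, ds_slash, ds_slash, dw_slash_cons, dw_rep r, ih]
        · simp at hc; subst hc
          have h1 : rep ('/' :: b :: r) = '/' :: b :: rep r := by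
            have : rep (b :: r) = b :: rep r := rep_cons_ne b r hb
            have hbf : (b == '/') = false := by simpa using hb
            simp [rep, hbf, this]
          have ih := ds_rep r
          rw [h1, ds_slash, ds_slash, dw_cons_ne b (rep r) hb, dw_cons_ne b r hb,
            ds_cons_ne b (rep r) hb, ds_cons_ne b r hb, ih]
    · have h1 : rep (c :: rest) = c :: rep rest := rep_cons_ne c rest hc
      have ih := ds_rep rest
      rw [h1, ds_cons_ne c (rep rest) hc, ds_cons_ne c rest hc, ih]
  termination_by p.length
  decreasing_by
    · have := List.length_dropWhile_le (· == '/') r; simp; omega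
    · simp
    · simp

theorem ds_of_no_dd (p : List Char) (h : ¬ ['/', '/'] <:+: p) : ds p = p := by
  match p with
  | [] => rw [ds]
  | c :: rest =>
    have hrest : ¬ ['/', '/'] <:+: rest := fun hi => h (List.infix_cons_iff.mpr (Or.inr hi))
    by_cases hc : (c == '/') = true
    · simp at hc; subst hc
      have hdw : rest.dropWhile (· == '/') = rest := by
        cases rest with
        | nil => rfl
        | cons b r =>
          have hb : ¬ (b == '/') = true := by
            intro hb'
            simp at hb'
            subst hb'
            exact h (List.infix_cons_iff.mpr (Or.inl ⟨r, rfl⟩))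
          exact dw_cons_ne b r hb
      rw [ds_slash, hdw, ds_of_no_dd rest hrest]
    · rw [ds_cons_ne c rest hc, ds_of_no_dd rest hrest]

-- the replace.go scan equals rep
theorem replace_go_eq (fuel : Nat) (l acc : List Char) (h : l.length ≤ fuel) :
    PySem.Chars.replace.go ['/', '/'] ['/'] fuel l acc = acc.reverse ++ rep l := by
  match fuel, l with
  | 0, l =>
    have : l = [] := by cases l with | nil => rfl | cons a t => simp at h
    subst this
    simp [PySem.Chars.replace.go, rep]
  | fuel + 1, [] => simp [PySem.Chars.replace.go, rep]
  | fuel + 1, c :: t =>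
    by_cases hp : (List.isPrefixOf ['/', '/'] (c :: t)) = true
    · obtain ⟨u, hu⟩ := List.isPrefixOf_iff_prefix.mp hp
      have hu' : '/' :: '/' :: u = c :: t := by simpa using hu
      injection hu' with h1 h2
      subst h1; subst h2
      rw [PySem.Chars.replace.go]
      simp only [hp, if_pos, List.length_cons, List.length_nil, List.drop_succ_cons,
        List.drop_zero, List.reverse_cons, List.reverse_nil, List.nil_append,
        List.singleton_append]
      have hlen : u.length ≤ fuel := by simp at h; omega
      rw [replace_go_eq fuel u ('/' :: acc) hlen]
      simp [rep]
    · rw [PySem.Chars.replace.go]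
      have hlen : t.length ≤ fuel := by simp at h; omega
      rw [if_neg (by simpa using hp), replace_go_eq fuel t (c :: acc) hlen]
      have : rep (c :: t) = c :: rep t := by
        cases t with
        | nil => simp [rep]
        | cons b r =>
          have : (c == '/' && b == '/') = false := by
            by_contra hcb
            simp at hcb
            exact absurd (by simp [List.isPrefixOf, hcb.1, hcb.2]) hp
          simp [rep, this]
      simp [this]

theorem replace_eq_rep (p : List Char) :
    PySem.Chars.replace p ['/', '/'] ['/'] = rep p := by
  rw [PySem.Chars.replace]
  simp only [List.isEmpty_cons, Bool.false_eq_true, if_false]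
  simpa using replace_go_eq p.length p [] le_rfl

theorem collapseLoop_eq_ds (fuel : Nat) (p : List Char) (h : p.length < fuel) :
    collapseLoop fuel p = ds p := by
  match fuel with
  | 0 => omega
  | n + 1 =>
    rw [collapseLoop]
    by_cases hd : PySem.Chars.isIn ['/', '/'] p = true
    · have hinf : ['/', '/'] <:+: p := (PySem.Chars.isIn_iff_infix _ _).mp hd
      rw [if_pos hd, replace_eq_rep]
      have hlt := rep_length_lt p hinf
      rw [collapseLoop_eq_ds n (rep p) (by omega)]
      exact ds_rep p
    · rw [if_neg hd]
      exact (ds_of_no_dd p ((PySem.Chars.isIn_eq_false_iff _ _).mp (by simpa using hd))).symm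

-- rstrip("/") one-step characterisation
theorem rsl_cons (a : Char) (x : List Char) :
    rsl (a :: x) = if rsl x = [] then (if a == '/' then [] else [a]) else a :: rsl x := by
  unfold rsl
  rw [show (a :: x).reverse = x.reverse ++ [a] by simp, List.dropWhile_append]
  by_cases he : (x.reverse.dropWhile (· == '/')).isEmpty = true
  · rw [if_pos he]
    have : x.reverse.dropWhile (· == '/') = [] := by simpa [List.isEmpty_iff] using he
    rw [if_pos (by simp [this])]
    by_cases ha : (a == '/') = true
    · simp [List.dropWhile_cons, ha]
    · simp [List.dropWhile_cons, ha]
  · rw [if_neg he]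
    have hne : x.reverse.dropWhile (· == '/') ≠ [] := by simpa [List.isEmpty_iff] using he
    rw [if_neg (by simp [hne])]
    simp

-- A's pipeline tail (collapse then rstrip) equals canon
mutual
theorem rsl_ds_slash (t : List Char) : rsl (ds ('/' :: t)) = canon t := by
  match t with
  | [] =>
    rw [ds_slash]
    simp [ds, rsl, canon, List.dropWhile]
  | c :: t' =>
    by_cases hc : (c == '/') = true
    · simp at hc; subst hc
      have key : ds ('/' :: '/' :: t') = ds ('/' :: t') := by
        rw [ds_slash, ds_slash, dw_slash_cons]
      rw [key, rsl_ds_slash t']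
      simp [canon]
    · have key : ds ('/' :: c :: t') = '/' :: c :: ds t' := by
        rw [ds_slash, dw_cons_ne c t' hc, ds_cons_ne c t' hc]
      rw [key, rsl_cons, rsl_cons]
      have ih := rsl_ds_tail t'
      rw [ih]
      by_cases hz : canonTail t' = []
      · simp [hz, hc, canon]
      · simp [hz, hc, canon]
  termination_by t.length

theorem rsl_ds_tail (u : List Char) : rsl (ds u) = canonTail u := by
  match u with
  | [] => simp [ds, rsl, canonTail, List.dropWhile]
  | c :: u' =>
    by_cases hc : (c == '/') = true
    · simp at hc; subst hc
      rw [rsl_ds_slash u']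
      simp [canonTail]
    · rw [ds_cons_ne c u' hc, rsl_cons, rsl_ds_tail u']
      by_cases hz : canonTail u' = []
      · simp [hz, hc, canonTail]
      · simp [hz, hc, canonTail]
  termination_by u.length
end

theorem sp_ne_nil (t : List Char) : sp t ≠ [] := by
  cases t with
  | nil => simp [sp]
  | cons c rest =>
    rw [sp]
    by_cases hc : (c == '/') = true
    · simp [hc]
    · simp [hc]
      cases hs : sp rest with
      | nil => simp [consHead]
      | cons h tl => simp [consHead]

theorem prependHead_append (x : List Char) (c : Char) (l : List (List Char)) :
    prependHead (x ++ [c]) l = prependHead x (consHead c l) := by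
  cases l with
  | nil => simp [prependHead, consHead]
  | cons h t => simp [prependHead, consHead]

theorem splitOn_go_eq (fuel : Nat) (l cur : List Char) (acc : List (List Char))
    (h : l.length < fuel) :
    PySem.Chars.splitOn.go ['/'] fuel l cur acc = acc.reverse ++ prependHead cur.reverse (sp l) := by
  match fuel, l with
  | 0, l => omega
  | fuel + 1, [] => simp [PySem.Chars.splitOn.go, sp, prependHead]
  | fuel + 1, c :: rest =>
    by_cases hc : (c == '/') = true
    · simp at hc; subst hc
      have hp : (List.isPrefixOf ['/'] ('/' :: rest)) = true := by simp [List.isPrefixOf]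
      rw [PySem.Chars.splitOn.go]
      simp only [hp, if_pos, List.length_cons, List.length_nil, List.drop_succ_cons,
        List.drop_zero]
      rw [splitOn_go_eq fuel rest [] (cur.reverse :: acc) (by simp at h ⊢; omega)]
      obtain ⟨hh, htl, hs⟩ : ∃ hh tl, sp rest = hh :: tl := by
        cases hs : sp rest with
        | nil => exact absurd hs (sp_ne_nil rest)
        | cons a b => exact ⟨a, b, rfl⟩
      simp [sp, hs, prependHead]
    · have hp : (List.isPrefixOf ['/'] (c :: rest)) = false := by
        simp [List.isPrefixOf]
        intro hcc
        exact absurd hcc.symm (by simpa using hc)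
      rw [PySem.Chars.splitOn.go]
      simp only [hp, Bool.false_eq_true, if_false]
      rw [splitOn_go_eq fuel rest (c :: cur) acc (by simp at h ⊢; omega)]
      rw [show (c :: cur).reverse = cur.reverse ++ [c] by simp, prependHead_append]
      rw [sp]
      simp [hc]

theorem splitOn_eq_sp (t : List Char) : PySem.Chars.splitOn t ['/'] = sp t := by
  rw [PySem.Chars.splitOn, splitOn_go_eq (t.length + 1) t [] [] (by omega)]
  obtain ⟨hh, htl, hs⟩ : ∃ hh tl, sp t = hh :: tl := by
    cases hs : sp t with
    | nil => exact absurd hs (sp_ne_nil t)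
    | cons a b => exact ⟨a, b, rfl⟩
  simp [hs, prependHead]

-- B's pipeline equals canon
mutual
theorem flatten_segs (t : List Char) :
    (((sp t).filter (fun c => !c.isEmpty)).map (fun s => '/' :: s)).flatten = canon t := by
  match t with
  | [] => simp [sp, canon]
  | c :: t' =>
    by_cases hc : (c == '/') = true
    · rw [sp]
      simp only [hc, if_pos]
      rw [canon]
      simp only [hc, if_pos]
      have := flatten_segs t'
      simpa using this
    · rw [sp]
      simp only [hc, Bool.false_eq_true, if_false]
      obtain ⟨hh, htl, hs⟩ : ∃ hh tl, sp t' = hh :: tl := by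
        cases hs : sp t' with
        | nil => exact absurd hs (sp_ne_nil t')
        | cons a b => exact ⟨a, b, rfl⟩
      rw [hs]
      have ih := flatten_segs_tail t' hh htl hs
      simp only [consHead, List.filter, List.isEmpty_cons, Bool.not_false, List.map, List.flatten]
      rw [canon]
      simp only [hc, Bool.false_eq_true, if_false]
      rw [← ih]
      simp
  termination_by t.length

theorem flatten_segs_tail (t : List Char) (hh : List Char) (tl : List (List Char))
    (hs : sp t = hh :: tl) :
    hh ++ ((tl.filter (fun c => !c.isEmpty)).map (fun s => '/' :: s)).flatten = canonTail t := by
  match t with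
  | [] =>
    rw [sp] at hs
    obtain ⟨h1, h2⟩ : hh = [] ∧ tl = [] := by simpa using hs.symm
    subst h1; subst h2
    simp [canonTail]
  | c :: t' =>
    by_cases hc : (c == '/') = true
    · rw [sp] at hs
      simp only [hc, if_pos] at hs
      obtain ⟨h1, h2⟩ : hh = [] ∧ tl = sp t' := by
        cases hs; exact ⟨rfl, rfl⟩
      subst h1; subst h2
      rw [canonTail]
      simp only [hc, if_pos]
      have := flatten_segs t'
      simpa using this
    · rw [sp] at hs
      simp only [hc, Bool.false_eq_true, if_false] at hs
      obtain ⟨hh2, tl2, hs2⟩ : ∃ hh2 tl2, sp t' = hh2 :: tl2 := by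
        cases hx : sp t' with
        | nil => exact absurd hx (sp_ne_nil t')
        | cons a b => exact ⟨a, b, rfl⟩
      rw [hs2] at hs
      simp only [consHead] at hs
      obtain ⟨h1, h2⟩ : hh = c :: hh2 ∧ tl = tl2 := by cases hs; exact ⟨rfl, rfl⟩
      subst h1; subst h2
      rw [canonTail]
      simp only [hc, Bool.false_eq_true, if_false]
      rw [← flatten_segs_tail t' hh2 tl hs2]
      simp
  termination_by t.length
end

theorem flatten_join (h : List Char) (tl : List (List Char)) :
    (((h :: tl).map (fun s => '/' :: s)).flatten) = '/' :: PySem.Chars.join ['/'] (h :: tl) := by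
  induction tl generalizing h with
  | nil => simp [PySem.Chars.join_singleton]
  | cons h2 tl' ih =>
    rw [PySem.Chars.join_cons_cons]
    simp only [List.map, List.flatten] at ih ⊢
    rw [ih h2]
    simp

-- ===== VERDICT (by name: the statement is the Claim_ definition above) =====
theorem sanitize_prefix_py_spec : Claim_equal_sanitize_prefix_py := by
  intro prefix_ _
  unfold Spec_sanitize_prefix_py sanitize_prefix_py sanitize_prefix_py_alt
  match prefix_ with
  | none => rfl
  | some s =>
    simp only []
    set t := PySem.Chars.strip s.toList with ht
    rw [splitOn_eq_sp]
    by_cases h0 : t = [] ∨ t = ['/']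
    · rcases h0 with h0 | h0 <;> rw [h0] <;> simp [sp, consHead]
    · rw [if_neg h0]
      -- p3 = flatten over filtered segments, in both branch cases
      have key : ((collapseLoop
            ((if PySem.Chars.startswith t ['/'] then t else '/' :: t).length + 1)
            (if PySem.Chars.startswith t ['/'] then t else '/' :: t)).reverse.dropWhile
            (· == '/')).reverse
          = (((sp t).filter (fun c => !c.isEmpty)).map (fun s => '/' :: s)).flatten := by
        by_cases hsw : PySem.Chars.startswith t ['/'] = true
        · obtain ⟨u, hu⟩ := (PySem.Chars.startswith_iff t ['/']).mp hsw
          have ht' : t = '/' :: u := by simpa using hu.symm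
          rw [if_pos hsw, collapseLoop_eq_ds _ _ (by omega)]
          rw [ht']
          have h1 : rsl (ds ('/' :: u)) = canon u := rsl_ds_slash u
          rw [show ((ds ('/' :: u)).reverse.dropWhile (· == '/')).reverse = rsl (ds ('/' :: u)) from rfl, h1]
          rw [← flatten_segs u]
          rw [sp]
          simp
        · rw [if_neg hsw, collapseLoop_eq_ds _ _ (by omega)]
          rw [show ((ds ('/' :: t)).reverse.dropWhile (· == '/')).reverse = rsl (ds ('/' :: t)) from rfl]
          rw [rsl_ds_slash t, ← flatten_segs t]
      rw [key]
      cases hsegs : (sp t).filter (fun c => !c.isEmpty) with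
      | nil => simp
      | cons hh tl =>
        rw [flatten_join hh tl]
        simp
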